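-- pv_equiv track=rewrite | github.com/epilectrik/voynich | phases/exploration/azc_folio_clustering.py | get_clusters_simple
-- ===== SOURCE A (Python) =====
-- def get_clusters_simple(merges, n, k):
--     """Simpler cluster extraction using merge tree with Union-Find."""
--     if k >= n:
--         return {i: i for i in range(n)}
--     if k <= 1:
--         return {i: 0 for i in range(n)}
--
--     # Use Union-Find to track cluster membership
--     parent = list(range(n + len(merges)))  # Room for all cluster IDs
--
--     def find(x):
--         if parent[x] != x:
--             parent[x] = find(parent[x])
--         return parent[x]
--
--     def union(x, y, new_id):
--         px, py = find(x), find(y)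
--         parent[px] = new_id
--         parent[py] = new_id
--
--     # Process merges: start with n clusters, stop when we reach k
--     num_clusters = n
--     for merge_idx, merge in enumerate(merges):
--         if num_clusters <= k:
--             break
--
--         left = merge['left']
--         right = merge['right']
--         new_id = n + merge_idx  # New cluster ID
--
--         union(left, right, new_id)
--         num_clusters -= 1
--
--     # Get final cluster assignments for original items (0 to n-1)
--     raw_clusters = [find(i) for i in range(n)]
--
--     # Renumber to 0..k-1
--     unique = sorted(set(raw_clusters))
--     mapping = {c: i for i, c in enumerate(unique)}
--     return {i: mapping[raw_clusters[i]] for i in range(n)}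
-- ===== SOURCE B (Python) =====
-- def get_clusters_simple(merges, n, k):
--     if k >= n:
--         return {i: i for i in range(n)}
--     if k <= 1:
--         return {i: 0 for i in range(n)}
--     size = n + len(merges)
--     root = list(range(size))
--     steps = min(len(merges), n - k)
--     for idx in range(steps):
--         m = merges[idx]
--         rl = root[m['left']]
--         rr = root[m['right']]
--         new_id = n + idx
--         root = [new_id if r == rl or r == rr else r for r in root]
--     raw = root[:n]
--     unique = sorted(set(raw))
--     mapping = {c: i for i, c in enumerate(unique)}
--     return {i: mapping[c] for i, c in enumerate(raw)}
-- ===== Notes on version B (the rewrite author's own statement) =====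
-- stated objective: simpler
-- what changed: Replaces the lazy union-find (recursive path-compressing find plus a final find per item) with an eagerly maintained flat root array that is relabelled in one comprehension per merge, so no find/recursion exists at all and the final assignments are read off directly.
-- outside the precondition, e.g. on get_clusters_simple([{'left': -1, 'right': 0}], 3, 2): A returns {0: 2, 1: 0, 2: 1}, B returns {0: 2, 1: 0, 2: 1}
import Mathlib
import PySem

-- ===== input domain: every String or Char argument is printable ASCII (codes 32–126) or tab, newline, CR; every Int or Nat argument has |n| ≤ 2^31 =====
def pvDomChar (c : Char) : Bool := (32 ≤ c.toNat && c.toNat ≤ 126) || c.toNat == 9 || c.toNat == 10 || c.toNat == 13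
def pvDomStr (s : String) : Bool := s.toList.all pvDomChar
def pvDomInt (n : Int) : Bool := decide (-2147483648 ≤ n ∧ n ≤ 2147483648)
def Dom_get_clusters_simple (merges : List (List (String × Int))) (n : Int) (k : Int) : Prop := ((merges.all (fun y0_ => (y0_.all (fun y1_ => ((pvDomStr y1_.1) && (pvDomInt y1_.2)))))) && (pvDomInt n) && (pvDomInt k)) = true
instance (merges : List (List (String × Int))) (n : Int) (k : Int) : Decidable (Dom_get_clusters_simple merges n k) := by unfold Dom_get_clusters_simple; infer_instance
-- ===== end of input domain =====

-- B replaces the recursive path-compressing union-find of A with an eagerly maintained flat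
-- root array relabelled once per merge (simpler: no recursion, no find); return values agree on Pre_.

-- ===== PORT A =====
-- recursive find with path compression; fuel = parent.length (always sufficient inside Pre_,
-- where parent chains strictly increase; Python would hit RecursionError only outside Pre_)
def findA : Nat → List Int → Int → List Int × Int
  | 0, parent, x => (parent, x)
  | fuel+1, parent, x =>
    let p := PySem.List.pyGetD parent x 0
    if p ≠ x then
      let res := findA fuel parent p
      (PySem.List.pySetD res.1 x res.2, res.2)
    else (parent, p)

def unionA (parent : List Int) (x y newId : Int) : List Int :=
  let r1 := findA parent.length parent x
  let r2 := findA r1.1.length r1.1 y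
  PySem.List.pySetD (PySem.List.pySetD r2.1 r1.2 newId) r2.2 newId

def bodyA (n k : Int) : (List Int × Int) → (Int × List (String × Int)) → (List Int × Int) :=
  fun st mi =>
    if st.2 ≤ k then st
    else
      let left := PySem.Dict.getD (PySem.Dict.mk mi.2) "left" 0
      let right := PySem.Dict.getD (PySem.Dict.mk mi.2) "right" 0
      let newId := n + mi.1
      (unionA st.1 left right newId, st.2 - 1)


def get_clusters_simple (merges : List (List (String × Int))) (n : Int) (k : Int) : List (Int × Int) :=
  if k ≥ n then (PySem.List.pyRange 0 n 1).map (fun i => (i, i))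
  else if k ≤ 1 then (PySem.List.pyRange 0 n 1).map (fun i => (i, (0:Int)))
  else
    let parent0 := PySem.List.pyRange 0 (n + merges.length) 1
    let st := (PySem.List.enumerate merges 0).foldl (bodyA n k) (parent0, n)
    let res := (PySem.List.pyRange 0 n 1).foldl (fun (acc : List Int × List Int) i =>
        let fr := findA acc.1.length acc.1 i
        (fr.1, acc.2 ++ [fr.2])) (st.1, [])
    let raw := res.2
    let unique := PySem.List.sorted (PySem.Set.ofList raw) (fun x => x) false
    let mapping := (PySem.List.enumerate unique 0).foldl
        (fun (d : PySem.Dict Int Int) ic => PySem.Dict.insert d ic.2 ic.1) PySem.Dict.empty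
    (PySem.List.pyRange 0 n 1).map (fun i => (i, PySem.Dict.getD mapping (PySem.List.pyGetD raw i 0) 0))

-- ===== PORT B =====
def bodyB (merges : List (List (String × Int))) (n : Int) : List Int → Int → List Int :=
  fun root idx =>
    let m := PySem.List.pyGetD merges idx []
    let rl := PySem.List.pyGetD root (PySem.Dict.getD (PySem.Dict.mk m) "left" 0) 0
    let rr := PySem.List.pyGetD root (PySem.Dict.getD (PySem.Dict.mk m) "right" 0) 0
    let newId := n + idx
    root.map (fun r => if r = rl ∨ r = rr then newId else r)


def get_clusters_simple_alt (merges : List (List (String × Int))) (n : Int) (k : Int) : List (Int × Int) :=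
  if k ≥ n then (PySem.List.pyRange 0 n 1).map (fun i => (i, i))
  else if k ≤ 1 then (PySem.List.pyRange 0 n 1).map (fun i => (i, (0:Int)))
  else
    let size := n + merges.length
    let root0 := PySem.List.pyRange 0 size 1
    let steps : Int := min (merges.length : Int) (n - k)
    let root := (PySem.List.pyRange 0 steps 1).foldl (bodyB merges n) root0
    let raw := PySem.List.slice root none (some n)
    let unique := PySem.List.sorted (PySem.Set.ofList raw) (fun x => x) false
    let mapping := (PySem.List.enumerate unique 0).foldl
        (fun (d : PySem.Dict Int Int) ic => PySem.Dict.insert d ic.2 ic.1) PySem.Dict.empty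
    (PySem.List.enumerate raw 0).map (fun ic => (ic.1, PySem.Dict.getD mapping ic.2 0))

-- ===== PRECONDITION & SPEC =====
-- number of merges A actually processes
def stepsOf (merges : List (List (String × Int))) (n : Int) (k : Int) : Nat :=
  if 1 < k ∧ k < n then min merges.length (n - k).toNat else 0

def okMerge (m : List (String × Int)) (bound : Int) : Bool :=
  match PySem.Dict.get? (PySem.Dict.mk m) "left", PySem.Dict.get? (PySem.Dict.mk m) "right" with
  | some l, some r => decide (0 ≤ l ∧ l < bound ∧ 0 ≤ r ∧ r < bound)
  | _, _ => false

-- Pre_ asks each merge A actually processes (the first min(len(merges), n-k) when 1 < k < n) to be a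
-- well-formed linkage row: 'left'/'right' keys present with cluster ids in [0, n+j) (only already-
-- allocated ids). Outside this A raises KeyError/IndexError/RecursionError on most inputs, and where
-- it still returns (negative-id wraparound, forward references into the parent array) the value is an
-- accident of its parent-array layout.
def Pre_get_clusters_simple (merges : List (List (String × Int))) (n : Int) (k : Int) : Prop :=
  ∀ j, j < stepsOf merges n k → okMerge (merges.getD j []) (n + j) = true

instance (merges : List (List (String × Int))) (n : Int) (k : Int) : Decidable (Pre_get_clusters_simple merges n k) := by unfold Pre_get_clusters_simple; infer_instance

def pvWitness_get_clusters_simple : (List (List (String × Int))) × Int × Int :=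
  ([[("left", 0), ("right", 1)]], 3, 2)

def Spec_get_clusters_simple (merges : List (List (String × Int))) (n : Int) (k : Int) (out : List (Int × Int)) : Prop := out = get_clusters_simple_alt merges n k
instance (merges : List (List (String × Int))) (n : Int) (k : Int) (out : List (Int × Int)) : Decidable (Spec_get_clusters_simple merges n k out) := by unfold Spec_get_clusters_simple; infer_instance

-- ===== CLAIM (what is proved, stated in full; the proofs are below) =====
def Claim_equal_get_clusters_simple : Prop := ∀ (merges : List (List (String × Int))) (n : Int) (k : Int), Dom_get_clusters_simple merges n k → Pre_get_clusters_simple merges n k → Spec_get_clusters_simple merges n k (get_clusters_simple merges n k)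

-- ===== LEMMAS AND PROOFS =====

-- getD through set / map, on in-range indices
theorem pv_getD_set (P : List Int) (x i : Nat) (v : Int) (hi : i < P.length) :
    (P.set x v).getD i 0 = if x = i then v else P.getD i 0 := by
  by_cases hx : x = i
  · subst hx
    simp [List.getD_eq_getElem?_getD, hi]
  · simp [List.getD_eq_getElem?_getD, hx]

theorem pv_getD_map (R : List Int) (f : Int → Int) (i : Nat) (hi : i < R.length) :
    (R.map f).getD i 0 = f (R.getD i 0) := by
  have hi' : i < (R.map f).length := by simpa using hi
  rw [List.getD_eq_getElem _ _ hi, List.getD_eq_getElem _ _ hi']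
  simp

-- the simulation invariant: P is A's parent array, R the eagerly relabelled flat root array of B;
-- m = number of allocated cluster ids, N = n + len(merges)
def pvInv (N m : Nat) (P R : List Int) : Prop :=
  P.length = N ∧ R.length = N ∧ ∀ i, i < N →
    ((i:Int) ≤ P.getD i 0 ∧ P.getD i 0 < (N:Int) ∧
     R.getD (P.getD i 0).toNat 0 = R.getD i 0 ∧
     (P.getD i 0 = (i:Int) → R.getD i 0 = (i:Int)) ∧
     (i:Int) ≤ R.getD i 0 ∧ R.getD i 0 < (N:Int) ∧
     P.getD (R.getD i 0).toNat 0 = R.getD i 0 ∧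
     ((m:Int) ≤ (i:Int) → P.getD i 0 = (i:Int)) ∧
     (i < m → R.getD i 0 < (m:Int)))

theorem pvInv_Rroot {N m : Nat} {P R : List Int} (h : pvInv N m P R) {i : Nat} (hi : i < N) :
    R.getD (R.getD i 0).toNat 0 = R.getD i 0 := by
  obtain ⟨h1, h2, h3, h4, h5, h6, h7, h8, h9⟩ := h.2.2 i hi
  have hr0 : (0:Int) ≤ R.getD i 0 := le_trans (by positivity) h5
  have hrN : (R.getD i 0).toNat < N := by omega
  obtain ⟨g1, g2, g3, g4, g5, g6, g7, g8, g9⟩ := h.2.2 _ hrN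
  have : P.getD (R.getD i 0).toNat 0 = ((R.getD i 0).toNat : Int) := by
    rw [h7]; omega
  have := g4 this
  rw [this]; omega

theorem pvInv_Rid {N m : Nat} {P R : List Int} (h : pvInv N m P R) {i : Nat}
    (hm : m ≤ i) (hi : i < N) : R.getD i 0 = (i:Int) := by
  obtain ⟨h1, h2, h3, h4, h5, h6, h7, h8, h9⟩ := h.2.2 i hi
  exact h4 (h8 (by omega))

-- path compression: pointing a non-root x at its root preserves the invariant
theorem pvInv_set_root {N m : Nat} {P R : List Int} (h : pvInv N m P R) {x : Nat}
    (hx : x < N) (hne : P.getD x 0 ≠ (x:Int)) :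
    pvInv N m (P.set x (R.getD x 0)) R := by
  obtain ⟨hP, hR, hinv⟩ := h
  refine ⟨by simpa using hP, hR, ?_⟩
  intro i hi
  obtain ⟨h1, h2, h3, h4, h5, h6, h7, h8, h9⟩ := hinv i hi
  have hgd : ∀ j : Nat, j < N → (P.set x (R.getD x 0)).getD j 0 = if x = j then R.getD x 0 else P.getD j 0 := by
    intro j hj; exact pv_getD_set P x j _ (by omega)
  rw [hgd i hi]
  by_cases hxi : x = i
  · subst hxi
    have hRr := pvInv_Rroot ⟨hP, hR, hinv⟩ hx
    simp only [reduceIte]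
    refine ⟨h5, h6, hRr, ?_, h5, h6, ?_, ?_, h9⟩
    · intro hrx; exact hrx
    · -- P'[ (R x).toNat ] = R x
      have hr0 : (0:Int) ≤ R.getD x 0 := le_trans (by positivity) h5
      have hrN : (R.getD x 0).toNat < N := by omega
      rw [hgd _ hrN]
      by_cases hxr : x = (R.getD x 0).toNat
      · simp only [if_pos hxr]
      · simp only [if_neg hxr]; exact h7
    · intro hmx; exact absurd (h8 hmx) hne
  · simp only [if_neg hxi]
    refine ⟨h1, h2, h3, h4, h5, h6, ?_, h8, h9⟩
    have hr0 : (0:Int) ≤ R.getD i 0 := le_trans (by positivity) h5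
    have hrN : (R.getD i 0).toNat < N := by omega
    rw [hgd _ hrN]
    by_cases hxr : x = (R.getD i 0).toNat
    · simp only [if_pos hxr]
      -- R i = ↑x, a root; so R x = R i
      have hxe : R.getD i 0 = (x:Int) := by omega
      have := pvInv_Rroot ⟨hP, hR, hinv⟩ hi
      rw [hxe] at this
      simp only [Int.toNat_natCast] at this
      rw [this, hxe]
    · simp only [if_neg hxr]; exact h7

theorem findA_spec {N m : Nat} {R : List Int} :
    ∀ (fuel : Nat) (P : List Int) (x : Nat), pvInv N m P R → x < N → N - x ≤ fuel →
    findA fuel P (x:Int) = ((findA fuel P (x:Int)).1, R.getD x 0) ∧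
      pvInv N m (findA fuel P (x:Int)).1 R ∧
      ∀ j : Nat, j < x → (findA fuel P (x:Int)).1.getD j 0 = P.getD j 0 := by
  intro fuel
  induction fuel with
  | zero => intro P x h hx hf; omega
  | succ fuel ih =>
    intro P x h hx hf
    obtain ⟨h1, h2, h3, h4, h5, h6, h7, h8, h9⟩ := h.2.2 x hx
    have hpy : PySem.List.pyGetD P (x:Int) 0 = P.getD x 0 := PySem.List.pyGetD_natCast P x 0
    have hred : findA (fuel+1) P (x:Int) =
        (if PySem.List.pyGetD P (x:Int) 0 ≠ (x:Int) then
          (PySem.List.pySetD (findA fuel P (PySem.List.pyGetD P (x:Int) 0)).1 (x:Int)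
            (findA fuel P (PySem.List.pyGetD P (x:Int) 0)).2,
           (findA fuel P (PySem.List.pyGetD P (x:Int) 0)).2)
        else (P, PySem.List.pyGetD P (x:Int) 0)) := rfl
    by_cases hne : P.getD x 0 = (x:Int)
    · have heq : findA (fuel+1) P (x:Int) = (P, P.getD x 0) := by
        rw [hred, hpy, if_neg (not_not_intro hne)]
      rw [heq]
      exact ⟨by rw [h4 hne, hne], h, fun j _ => rfl⟩
    · -- recursive case: follow the chain, then compress x
      have hlt : (x:Int) < P.getD x 0 := lt_of_le_of_ne h1 (fun e => hne e.symm)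
      have hp0 : (0:Int) ≤ P.getD x 0 := le_trans (by positivity) h1
      have hpN : (P.getD x 0).toNat < N := by omega
      have hpx : x < (P.getD x 0).toNat := by omega
      have hcast : P.getD x 0 = (((P.getD x 0).toNat : Nat) : Int) := by omega
      have ihres := ih P (P.getD x 0).toNat h hpN (by omega)
      rw [← hcast] at ihres
      have hval : (findA fuel P (P.getD x 0)).2 = R.getD x 0 := by
        rw [ihres.1]; exact h3
      have hstep : findA (fuel+1) P (x:Int)
          = (PySem.List.pySetD (findA fuel P (P.getD x 0)).1 (x:Int) (findA fuel P (P.getD x 0)).2,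
             (findA fuel P (P.getD x 0)).2) := by
        rw [hred, hpy, if_pos hne]
      rw [hstep, hval]
      have hset : PySem.List.pySetD (findA fuel P (P.getD x 0)).1 (x:Int) (R.getD x 0)
          = (findA fuel P (P.getD x 0)).1.set x (R.getD x 0) := PySem.List.pySetD_natCast _ x _
      rw [hset]
      have hinv' := ihres.2.1
      have hpres := ihres.2.2
      have hne' : (findA fuel P (P.getD x 0)).1.getD x 0 ≠ (x:Int) := by
        rw [hpres x hpx]; exact hne
      have hlen' : (findA fuel P (P.getD x 0)).1.length = N := hinv'.1
      refine ⟨rfl, pvInv_set_root hinv' hx hne', ?_⟩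
      intro j hj
      rw [pv_getD_set _ x j _ (by omega), if_neg (by omega)]
      exact hpres j (by omega)

-- one merge step: A's two root-pointer writes correspond to B's eager relabelling of the
-- flat root array, and allocate cluster id m
theorem pvInv_relabel {N m : Nat} {P R : List Int} (h : pvInv N m P R) (hmN : m < N)
    {rl rr : Int} (hrl0 : 0 ≤ rl) (hrlm : rl < (m:Int)) (hrr0 : 0 ≤ rr) (hrrm : rr < (m:Int))
    (hRrl : R.getD rl.toNat 0 = rl) (hRrr : R.getD rr.toNat 0 = rr)
    (hPrl : P.getD rl.toNat 0 = rl) (hPrr : P.getD rr.toNat 0 = rr) :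
    pvInv N (m+1) ((P.set rl.toNat (m:Int)).set rr.toNat (m:Int))
      (R.map (fun v => if v = rl ∨ v = rr then (m:Int) else v)) := by
  obtain ⟨hP, hR, hinv⟩ := h
  set f : Int → Int := fun v => if v = rl ∨ v = rr then (m:Int) else v with hf
  have hgd : ∀ j : Nat, j < N →
      ((P.set rl.toNat (m:Int)).set rr.toNat (m:Int)).getD j 0
        = if rr.toNat = j then (m:Int) else if rl.toNat = j then (m:Int) else P.getD j 0 := by
    intro j hj
    rw [pv_getD_set _ rr.toNat j _ (by simp [hP]; omega), pv_getD_set _ rl.toNat j _ (by omega)]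
  have hgm : ∀ j : Nat, j < N → (R.map f).getD j 0 = f (R.getD j 0) := by
    intro j hj; exact pv_getD_map R f j (by omega)
  have hRm : R.getD m 0 = (m:Int) := pvInv_Rid ⟨hP, hR, hinv⟩ (le_refl m) hmN
  have hfm : f ((m:Int)) = (m:Int) := by simp only [hf]; rw [if_neg (by omega)]
  have hPm : P.getD m 0 = (m:Int) := (hinv m hmN).2.2.2.2.2.2.2.1 (le_refl _)
  refine ⟨by simpa using hP, by simpa using hR, ?_⟩
  intro i hi
  obtain ⟨h1, h2, h3, h4, h5, h6, h7, h8, h9⟩ := hinv i hi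
  rw [hgd i hi, hgm i hi]
  by_cases hcase : rr.toNat = i ∨ rl.toNat = i
  · -- i is one of the two old roots; its new parent and new root are m
    have hRi : R.getD i 0 = rl ∨ R.getD i 0 = rr := by
      rcases hcase with hc | hc
      · right; rw [← hc]; exact hRrr
      · left; rw [← hc]; exact hRrl
    have hie : (if rr.toNat = i then (m:Int) else if rl.toNat = i then (m:Int) else P.getD i 0) = (m:Int) := by
      rcases hcase with hc | hc
      · rw [if_pos hc]
      · by_cases hc2 : rr.toNat = i
        · rw [if_pos hc2]
        · rw [if_neg hc2, if_pos hc]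
    rw [hie]
    have hfi : f (R.getD i 0) = (m:Int) := by
      simp only [hf]; rw [if_pos hRi]
    rw [hfi]
    have him : (i:Int) < (m:Int) := by rcases hcase with hc | hc <;> omega
    refine ⟨by omega, by omega, ?_, by omega, by omega, by omega, ?_, by omega, by omega⟩
    · simp only [Int.toNat_natCast]
      rw [hgm m hmN, hRm, hfm]
    · simp only [Int.toNat_natCast]
      rw [hgd m hmN, if_neg (by omega), if_neg (by omega)]
      exact hPm
  · -- any other index keeps its parent pointer; its root is relabelled through f
    rw [not_or] at hcase
    rw [if_neg hcase.1, if_neg hcase.2]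
    have hi0 : (0:Int) ≤ R.getD i 0 := le_trans (by positivity) h5
    have hp0 : (0:Int) ≤ P.getD i 0 := le_trans (by positivity) h1
    refine ⟨h1, by omega, ?_, ?_, ?_, ?_, ?_, ?_, ?_⟩
    · -- (R.map f)[P i] = (R.map f)[i]
      rw [hgm _ (by omega), h3]
    · -- new parent = i → new root = i
      intro hPi
      have hRi := h4 hPi
      simp only [hf]
      rw [hRi, if_neg (by intro hor; rcases hor with hh | hh <;> omega)]
    · -- i ≤ f (R i)
      simp only [hf]; split_ifs <;> omega
    · simp only [hf]; split_ifs <;> omega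
    · -- P'[ f(R i) ] = f(R i)
      simp only [hf]
      by_cases hRi : R.getD i 0 = rl ∨ R.getD i 0 = rr
      · rw [if_pos hRi]
        simp only [Int.toNat_natCast]
        rw [hgd m hmN, if_neg (by omega), if_neg (by omega)]
        exact hPm
      · rw [if_neg hRi]
        rw [not_or] at hRi
        rw [hgd _ (by omega), if_neg (by omega), if_neg (by omega)]
        exact h7
    · intro hmi
      exact h8 (by omega)
    · intro him
      simp only [hf]; split_ifs <;> push_cast <;> omega

theorem foldA_guard (n k : Int) : ∀ (ms : List (Int × List (String × Int))) (st : List Int × Int),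
    st.2 ≤ k → ms.foldl (bodyA n k) st = st := by
  intro ms
  induction ms with
  | nil => intro st _; rfl
  | cons a l ih =>
    intro st hst
    have : bodyA n k st a = st := by rw [bodyA, if_pos hst]
    rw [List.foldl_cons, this]
    exact ih st hst

theorem pv_pyGetD_int (xs : List Int) (i : Int) (h0 : 0 ≤ i) (h1 : i < (xs.length : Int)) :
    PySem.List.pyGetD xs i 0 = xs.getD i.toNat 0 := by
  rw [PySem.List.pyGetD_eq_getElem xs 0 h0 h1, List.getD_eq_getElem xs 0 (by omega)]

theorem loop_sim (merges : List (List (String × Int))) (n k : Int)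
    (hk1 : 1 < k) (hkn : k < n) (hpre : Pre_get_clusters_simple merges n k) :
    ∀ (d j : Nat) (P R : List Int), j + d = stepsOf merges n k →
    pvInv ((n + (merges.length : Int)).toNat) (n.toNat + j) P R →
    ∃ Pf Rf,
      (PySem.List.enumerate (merges.drop j) (j:Int)).foldl (bodyA n k) (P, n - (j:Int))
        = (Pf, n - (stepsOf merges n k : Int)) ∧
      (PySem.List.pyRange (j:Int) ((stepsOf merges n k : Int)) 1).foldl (bodyB merges n) R = Rf ∧
      pvInv ((n + (merges.length : Int)).toNat) (n.toNat + stepsOf merges n k) Pf Rf := by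
  have hn0 : (0:Int) ≤ n := by omega
  have hS : stepsOf merges n k = min merges.length (n - k).toNat := by
    rw [stepsOf, if_pos ⟨hk1, hkn⟩]
  have hSL : stepsOf merges n k ≤ merges.length := by omega
  have hSnk : (stepsOf merges n k : Int) ≤ n - k := by
    have : (stepsOf merges n k) ≤ (n-k).toNat := by omega
    omega
  intro d
  induction d with
  | zero =>
    intro j P R hjd hinv
    have hj : j = stepsOf merges n k := by omega
    subst hj
    refine ⟨P, R, ?_, ?_, hinv⟩
    · by_cases hc : stepsOf merges n k = merges.length
      · rw [hc, List.drop_length]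
        rfl
      · have : (stepsOf merges n k : Int) = n - k := by omega
        apply foldA_guard
        simp only
        omega
    · rw [PySem.List.pyRange_one_eq_nil (le_refl _)]
      rfl
  | succ d ih =>
    intro j P R hjd hinv
    have hjS : j < stepsOf merges n k := by omega
    have hjL : j < merges.length := by omega
    have hjnk : (j:Int) < n - k := by omega
    have hN : ((n + (merges.length : Int)).toNat : Int) = n + merges.length := by omega
    -- the j-th merge is well-formed
    have hok := hpre j hjS
    have hgetD : merges.getD j [] = merges[j] := List.getD_eq_getElem merges [] hjL
    rw [hgetD] at hok
    rw [okMerge] at hok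
    rcases hgl : PySem.Dict.get? (PySem.Dict.mk merges[j]) "left" with _ | l0 <;> rw [hgl] at hok
    · exact absurd hok (by simp)
    rcases hgr : PySem.Dict.get? (PySem.Dict.mk merges[j]) "right" with _ | r0 <;> rw [hgr] at hok
    · exact absurd hok (by simp)
    have hbnd := of_decide_eq_true hok
    obtain ⟨hl0, hlb, hr0, hrb⟩ := hbnd
    have hl0D : PySem.Dict.getD (PySem.Dict.mk merges[j]) "left" 0 = l0 := by
      rw [PySem.Dict.getD_eq_get?_getD, hgl]; rfl
    have hr0D : PySem.Dict.getD (PySem.Dict.mk merges[j]) "right" 0 = r0 := by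
      rw [PySem.Dict.getD_eq_get?_getD, hgr]; rfl
    -- peel one iteration off A's fold
    have hdrop : merges.drop j = merges[j] :: merges.drop (j+1) := List.drop_eq_getElem_cons hjL
    rw [hdrop, PySem.List.enumerate_cons, List.foldl_cons]
    -- peel one iteration off B's fold
    have hcons : PySem.List.pyRange (j:Int) ((stepsOf merges n k : Int)) 1
        = (j:Int) :: PySem.List.pyRange ((j:Int)+1) ((stepsOf merges n k : Int)) 1 :=
      PySem.List.pyRange_one_cons (by omega)
    rw [hcons, List.foldl_cons]
    -- names for this step
    set N := (n + (merges.length : Int)).toNat with hNdef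
    set m := n.toNat + j with hmdef
    have hmN : m < N := by omega
    have hl0N : l0.toNat < N := by omega
    have hr0N : r0.toNat < N := by omega
    have hl0m : l0.toNat < m := by omega
    have hr0m : r0.toNat < m := by omega
    have hPlen : P.length = N := hinv.1
    -- A's step: the two finds return the eager roots and preserve the invariant
    have hfl := findA_spec (R := R) P.length P l0.toNat hinv hl0N (by omega)
    have hcl : ((l0.toNat : Nat) : Int) = l0 := by omega
    rw [hcl] at hfl
    set P1 := (findA P.length P l0).1 with hP1
    have hinv1 : pvInv N m P1 R := hfl.2.1
    have hP1len : P1.length = N := hinv1.1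
    have hfr := findA_spec (R := R) P1.length P1 r0.toNat hinv1 hr0N (by omega)
    have hcr : ((r0.toNat : Nat) : Int) = r0 := by omega
    rw [hcr] at hfr
    set P2 := (findA P1.length P1 r0).1 with hP2
    have hinv2 : pvInv N m P2 R := hfr.2.1
    set rl := R.getD l0.toNat 0 with hrl
    set rr := R.getD r0.toNat 0 with hrr
    obtain ⟨c1, c2, c3, c4, c5, c6, c7, c8, c9⟩ := hinv2.2.2 l0.toNat hl0N
    obtain ⟨e1, e2, e3, e4, e5, e6, e7, e8, e9⟩ := hinv2.2.2 r0.toNat hr0N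
    have hrl0 : (0:Int) ≤ rl := le_trans (by positivity) c5
    have hrr0 : (0:Int) ≤ rr := le_trans (by positivity) e5
    have hrlm : rl < (m:Int) := c9 hl0m
    have hrrm : rr < (m:Int) := e9 hr0m
    have hmc : n + (j:Int) = ((m : Nat) : Int) := by omega
    have hunion : unionA P l0 r0 (n + (j:Int))
        = (P2.set rl.toNat ((m:Nat):Int)).set rr.toNat ((m:Nat):Int) := by
      rw [unionA]
      simp only [← hP1, ← hP2]
      rw [hfl.1, hfr.1]
      simp only
      rw [hmc, PySem.List.pySetD_of_nonneg _ _ hrl0, PySem.List.pySetD_of_nonneg _ _ hrr0]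
    -- the invariant after the merge, against B's relabelled array
    have hrelab := pvInv_relabel hinv2 hmN hrl0 hrlm hrr0 hrrm
      (pvInv_Rroot hinv2 hl0N) (pvInv_Rroot hinv2 hr0N) c7 e7
    -- A's step produces exactly that parent
    have hstepA : bodyA n k (P, n - (j:Int)) ((j:Int), merges[j])
        = ((P2.set rl.toNat ((m:Nat):Int)).set rr.toNat ((m:Nat):Int), n - ((j:Int)+1)) := by
      rw [bodyA]
      rw [if_neg (by simp only; omega)]
      simp only [hl0D, hr0D]
      rw [hunion]
      have : n - (j:Int) - 1 = n - ((j:Int)+1) := by omega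
      rw [this]
    -- B's step produces exactly the relabelled array
    have hRlen : R.length = N := hinv.2.1
    have hstepB : bodyB merges n R (j:Int)
        = R.map (fun v => if v = rl ∨ v = rr then ((m:Nat):Int) else v) := by
      rw [bodyB]
      simp only [PySem.List.pyGetD_natCast, hgetD, hl0D, hr0D]
      rw [pv_pyGetD_int R l0 hl0 (by omega), pv_pyGetD_int R r0 hr0 (by omega)]
      rw [hmc]
    rw [hstepA, hstepB]
    -- recurse
    have hnext : pvInv N (n.toNat + (j+1)) (((P2.set rl.toNat ((m:Nat):Int)).set rr.toNat ((m:Nat):Int)))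
        (R.map (fun v => if v = rl ∨ v = rr then ((m:Nat):Int) else v)) := by
      have : n.toNat + (j+1) = m + 1 := by omega
      rw [this]
      exact hrelab
    have hcast1 : ((j:Int)+1) = (((j+1 : Nat)):Int) := by push_cast; ring
    rw [hcast1]
    exact ih (j+1) _ _ (by omega) hnext

-- A's final pass: one find per item just reads off the eager root array
theorem raw_fold {N m : Nat} {R : List Int} :
    ∀ (js : List Int), (∀ x ∈ js, 0 ≤ x ∧ x < (N:Int)) →
    ∀ (P : List Int) (acc : List Int), pvInv N m P R →
    ∃ Pf, js.foldl (fun (a : List Int × List Int) i =>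
        ((findA a.1.length a.1 i).1, a.2 ++ [(findA a.1.length a.1 i).2])) (P, acc)
      = (Pf, acc ++ js.map (fun x => R.getD x.toNat 0)) ∧ pvInv N m Pf R := by
  intro js
  induction js with
  | nil => intro _ P acc hinv; exact ⟨P, by simp, hinv⟩
  | cons x rest ih =>
    intro hmem P acc hinv
    obtain ⟨hx0, hxN⟩ := hmem x List.mem_cons_self
    have hxN' : x.toNat < N := by omega
    have hcx : ((x.toNat : Nat) : Int) = x := by omega
    have hPlen : P.length = N := hinv.1
    have hfl := findA_spec (R := R) P.length P x.toNat hinv (by omega) (by omega)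
    rw [hcx] at hfl
    rw [List.foldl_cons]
    have hstep : ((findA P.length P x).1, acc ++ [(findA P.length P x).2])
        = ((findA P.length P x).1, acc ++ [R.getD x.toNat 0]) := by
      rw [hfl.1]
    rw [hstep]
    obtain ⟨Pf, hPf, hinvf⟩ := ih (fun y hy => hmem y (List.mem_cons_of_mem _ hy)) (findA P.length P x).1 (acc ++ [R.getD x.toNat 0]) hfl.2.1
    refine ⟨Pf, ?_, hinvf⟩
    rw [hPf]
    simp

theorem range_take (xs : List Int) (nn : Nat) (h : nn ≤ xs.length) :
    (PySem.List.pyRange 0 (nn:Int) 1).map (fun x => xs.getD x.toNat 0) = xs.take nn := by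
  apply List.ext_getElem
  · simp [PySem.List.length_pyRange_one]; omega
  · intro i hi1 hi2
    have hiN : i < nn := by
      simp [PySem.List.length_pyRange_one] at hi1; omega
    have hr : (PySem.List.pyRange 0 (nn:Int) 1).length = nn := by
      simp [PySem.List.length_pyRange_one]
    simp only [List.getElem_map]
    rw [List.getElem_take]
    have := PySem.List.getElem_pyRange_one 0 (nn:Int) i (by omega)
    rw [this]
    simp only [zero_add, Int.toNat_natCast]
    exact List.getD_eq_getElem xs 0 (by omega)

-- the two tail renumberings agree on the same raw list
theorem tail_eq (raw : List Int) (mapping : PySem.Dict Int Int) :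
    (PySem.List.enumerate raw 0).map (fun ic => (ic.1, PySem.Dict.getD mapping ic.2 0))
      = (PySem.List.pyRange 0 (raw.length : Int) 1).map
          (fun i => (i, PySem.Dict.getD mapping (PySem.List.pyGetD raw i 0) 0)) := by
  rw [PySem.List.enumerate_eq_map_pyRange raw 0, List.map_map]
  rfl

theorem pvInv_init (nL : Int) (m : Nat) (_h0 : 0 ≤ nL) :
    pvInv nL.toNat m (PySem.List.pyRange 0 nL 1) (PySem.List.pyRange 0 nL 1) := by
  have hlen : (PySem.List.pyRange 0 nL 1).length = nL.toNat := by
    simp [PySem.List.length_pyRange_one]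
  have hget : ∀ i : Nat, i < nL.toNat → (PySem.List.pyRange 0 nL 1).getD i 0 = (i:Int) := by
    intro i hi
    rw [List.getD_eq_getElem _ 0 (by omega), PySem.List.getElem_pyRange_one 0 nL i (by omega)]
    simp
  refine ⟨hlen, hlen, ?_⟩
  intro i hi
  rw [hget i hi]
  simp only [Int.toNat_natCast]
  rw [hget i hi]
  exact ⟨le_refl _, by omega, rfl, by simp, le_refl _, by omega, rfl, by simp, fun h => by omega⟩

theorem main_case (merges : List (List (String × Int))) (n k : Int)
    (hknn : ¬ k ≥ n) (hk1n : ¬ k ≤ 1) (hpre : Pre_get_clusters_simple merges n k) :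
    get_clusters_simple merges n k = get_clusters_simple_alt merges n k := by
  have hk1 : 1 < k := by omega
  have hkn : k < n := by omega
  have hn0 : (0:Int) ≤ n := by omega
  set L := merges.length with hL
  set S := stepsOf merges n k with hSdef
  have hS : S = min L (n - k).toNat := by rw [hSdef, stepsOf, if_pos ⟨hk1, hkn⟩]
  have hSL : S ≤ L := by omega
  have hSnk : (S : Int) ≤ n - k := by
    have : S ≤ (n-k).toNat := by omega
    omega
  have hSmin : (S : Int) = min (L : Int) (n - k) := by
    rw [hS]
    have h1 : (0:Int) ≤ n - k := by omega
    omega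
  set N := (n + (L : Int)).toNat with hNdef
  have hNn : ((N:Nat):Int) = n + L := by omega
  -- run the merge loop on both sides
  have hinv0 : pvInv N n.toNat (PySem.List.pyRange 0 (n + (L:Int)) 1) (PySem.List.pyRange 0 (n + (L:Int)) 1) :=
    pvInv_init (n + (L:Int)) n.toNat (by omega)
  obtain ⟨Pf, Rf, hA, hB, hinvf⟩ := loop_sim merges n k hk1 hkn hpre S 0
    (PySem.List.pyRange 0 (n + (L:Int)) 1) (PySem.List.pyRange 0 (n + (L:Int)) 1)
    (by omega) (by simpa using hinv0)
  simp only [List.drop_zero, Nat.cast_zero, sub_zero] at hA hB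
  -- run the raw-cluster extraction on A's side
  obtain ⟨Pf2, hraw, _⟩ := raw_fold (N := N) (m := n.toNat + S) (R := Rf)
    (PySem.List.pyRange 0 n 1)
    (by intro x hx; rw [PySem.List.mem_pyRange_one] at hx; constructor <;> omega)
    Pf [] hinvf
  have hRflen : Rf.length = N := hinvf.2.1
  -- B's slice and A's extracted raw list agree
  have htake : (PySem.List.pyRange 0 n 1).map (fun x => Rf.getD x.toNat 0) = Rf.take n.toNat := by
    have := range_take Rf n.toNat (by omega)
    rw [Int.toNat_of_nonneg hn0] at this
    exact this
  have hslice : PySem.List.slice Rf none (some n) = Rf.take n.toNat :=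
    PySem.List.slice_to Rf hn0
  have hlentake : (((Rf.take n.toNat).length : Nat) : Int) = n := by
    simp [List.length_take]
    omega
  -- unfold both programs and rewrite the pieces
  rw [get_clusters_simple, get_clusters_simple_alt, if_neg hknn, if_neg hknn, if_neg hk1n, if_neg hk1n]
  simp only [← hL]
  rw [← hSmin]
  simp only [hA]
  rw [hraw]
  rw [hB]
  simp only [List.nil_append, htake, hslice]
  rw [tail_eq, hlentake]

-- ===== VERDICT (by name: the statement is the Claim_ definition above) =====
theorem get_clusters_simple_spec : Claim_equal_get_clusters_simple := by
  unfold Claim_equal_get_clusters_simple Spec_get_clusters_simple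
  intro merges n k hdom hpre
  by_cases hknn : k ≥ n
  · rw [get_clusters_simple, get_clusters_simple_alt, if_pos hknn, if_pos hknn]
  · by_cases hk1n : k ≤ 1
    · rw [get_clusters_simple, get_clusters_simple_alt, if_neg hknn, if_neg hknn, if_pos hk1n, if_pos hk1n]
    · exact main_case merges n k hknn hk1n hpre
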